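-- pv_equiv track=rewrite | github.com/OlaDimensions/Evo-RL | scripts/patch_lerobot_to_ego_bimanual_schema.py | remap_episode_column
-- ===== SOURCE A (Python) =====
-- VIDEO_KEY_MAP = {
--     "observation.images.right_front": "observation.images.main",
--     "observation.images.left_wrist": "observation.images.camera0",
--     "observation.images.right_wrist": "observation.images.camera1",
-- }
--
-- def remap_episode_column(column: str) -> str:
--     for old_key, new_key in VIDEO_KEY_MAP.items():
--         old_prefix = f"videos/{old_key}/"
--         if column.startswith(old_prefix):
--             return f"videos/{new_key}/{column[len(old_prefix):]}"
--         old_stats_prefix = f"stats/{old_key}/"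
--         if column.startswith(old_stats_prefix):
--             return f"stats/{new_key}/{column[len(old_stats_prefix):]}"
--     return column
-- ===== SOURCE B (Python) =====
-- VIDEO_KEY_MAP = {
--     "observation.images.right_front": "observation.images.main",
--     "observation.images.left_wrist": "observation.images.camera0",
--     "observation.images.right_wrist": "observation.images.camera1",
-- }
--
-- def remap_episode_column(column: str) -> str:
--     parts = column.split("/")
--     if len(parts) >= 3 and parts[0] in ("videos", "stats") and parts[1] in VIDEO_KEY_MAP:
--         return f"{parts[0]}/{VIDEO_KEY_MAP[parts[1]]}/" + "/".join(parts[2:])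
--     return column
-- ===== Notes on version B (the rewrite author's own statement) =====
-- stated objective: simpler
-- what changed: Replaces the loop over the key map with six startswith prefix tests by a single split on the slash separator followed by one dict lookup on the second component.
import Mathlib
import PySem

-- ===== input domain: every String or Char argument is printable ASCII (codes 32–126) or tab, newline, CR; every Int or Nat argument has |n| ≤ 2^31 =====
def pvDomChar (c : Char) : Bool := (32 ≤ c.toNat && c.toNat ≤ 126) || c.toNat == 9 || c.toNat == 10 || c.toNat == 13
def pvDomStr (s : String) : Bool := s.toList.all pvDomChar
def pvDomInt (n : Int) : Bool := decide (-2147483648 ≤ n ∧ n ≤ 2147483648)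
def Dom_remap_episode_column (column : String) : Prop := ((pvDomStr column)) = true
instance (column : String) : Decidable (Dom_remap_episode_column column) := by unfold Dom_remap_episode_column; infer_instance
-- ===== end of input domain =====

-- B replaces A's loop over the key map with six startswith tests by one split on the slash separator and a single dict lookup (objective: simpler).

-- ===== PORT A =====
-- module-level constant (shared by both Python files)
def VIDEO_KEY_MAP : PySem.Dict (List Char) (List Char) :=
  ⟨[("observation.images.right_front".toList, "observation.images.main".toList),
    ("observation.images.left_wrist".toList, "observation.images.camera0".toList),
    ("observation.images.right_wrist".toList, "observation.images.camera1".toList)]⟩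

-- the 'for old_key, new_key in VIDEO_KEY_MAP.items():' loop of A
def remapItemsLoop : List (List Char × List Char) → List Char → List Char
  | [], col => col
  | (old_key, new_key) :: rest, col =>
    let old_prefix := "videos/".toList ++ (old_key ++ "/".toList)
    if PySem.Chars.startswith col old_prefix then
      "videos/".toList ++ (new_key ++ ("/".toList ++ PySem.Chars.slice col (some (PySem.List.len old_prefix)) none))
    else
      let old_stats_prefix := "stats/".toList ++ (old_key ++ "/".toList)
      if PySem.Chars.startswith col old_stats_prefix then
        "stats/".toList ++ (new_key ++ ("/".toList ++ PySem.Chars.slice col (some (PySem.List.len old_stats_prefix)) none))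
      else remapItemsLoop rest col

def remap_episode_column (column : String) : String :=
  String.ofList (remapItemsLoop VIDEO_KEY_MAP.items column.toList)

-- ===== PORT B =====
-- B: parts = column.split('/'); if len(parts) >= 3 and parts[0] in ('videos','stats') and parts[1] in VIDEO_KEY_MAP: rebuild; else unchanged
def remapParts (cs : List Char) : List Char :=
  let parts := PySem.Chars.splitOn cs "/".toList
  if 3 ≤ parts.length ∧
      (PySem.List.pyGetD parts 0 [] = "videos".toList ∨ PySem.List.pyGetD parts 0 [] = "stats".toList) ∧
      (PySem.Dict.get? VIDEO_KEY_MAP (PySem.List.pyGetD parts 1 [])).isSome = true then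
    PySem.List.pyGetD parts 0 [] ++ ("/".toList ++
      ((PySem.Dict.get? VIDEO_KEY_MAP (PySem.List.pyGetD parts 1 [])).getD [] ++ ("/".toList ++
      PySem.Chars.join "/".toList (PySem.List.slice parts (some 2) none))))
  else cs

def remap_episode_column_alt (column : String) : String :=
  String.ofList (remapParts column.toList)

-- ===== PRECONDITION & SPEC =====
def Spec_remap_episode_column (column : String) (out : String) : Prop := out = remap_episode_column_alt column
instance (column : String) (out : String) : Decidable (Spec_remap_episode_column column out) := by unfold Spec_remap_episode_column; infer_instance

-- ===== CLAIM (what is proved, stated in full; the proofs are below) =====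
def Claim_equal_remap_episode_column : Prop := ∀ (column : String), Dom_remap_episode_column column → Spec_remap_episode_column column (remap_episode_column column)

-- ===== LEMMAS AND PROOFS =====

lemma splitOn_cons_self (s : Char) (l : List Char) : (s :: l).splitOn s = [] :: l.splitOn s := by
  simp [List.splitOn, List.splitOnP_cons]

lemma splitOn_cons_ne (s c : Char) (h : c ≠ s) (l : List Char) :
    (c :: l).splitOn s = (l.splitOn s).modifyHead (c :: ·) := by
  simp [List.splitOn, List.splitOnP_cons, h]

lemma splitOn_ne_nil (s : Char) (l : List Char) : l.splitOn s ≠ [] := by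
  induction l with
  | nil => simp [List.splitOn]
  | cons c l ih =>
    by_cases hc : c = s
    · subst hc; simp [splitOn_cons_self]
    · rw [splitOn_cons_ne s c hc]
      rcases hq : l.splitOn s with _|⟨q,qs⟩
      · exact absurd hq ih
      · simp

lemma go_single (s : Char) : ∀ (fuel : Nat) (l cur : List Char) (acc : List (List Char)), l.length ≤ fuel →
    PySem.Chars.splitOn.go [s] fuel l cur acc = acc.reverse ++ (l.splitOn s).modifyHead (cur.reverse ++ ·)
  | 0, l, cur, acc, h => by
    simp at h; subst h
    simp [PySem.Chars.splitOn.go, List.splitOn]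
  | fuel+1, [], cur, acc, h => by
    simp [PySem.Chars.splitOn.go, List.splitOn]
  | fuel+1, c :: rest, cur, acc, h => by
    rw [PySem.Chars.splitOn.go]
    by_cases hc : s = c
    · subst hc
      simp only [List.isPrefixOf, beq_self_eq_true, Bool.true_and, if_true, List.length_cons, List.drop_succ_cons, List.length_nil, List.drop_zero]
      rw [go_single s fuel rest [] (cur.reverse :: acc) (by simpa using h)]
      rw [splitOn_cons_self]
      rcases hsp : rest.splitOn s with _ | ⟨q, qs⟩
      · exact absurd hsp (splitOn_ne_nil s rest)
      · simp
    · have hbeq : (s == c) = false := by simpa using hc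
      simp only [List.isPrefixOf, hbeq, Bool.false_and]
      rw [go_single s fuel rest (c :: cur) acc (by simpa using h)]
      rw [splitOn_cons_ne s c (fun h' => hc h'.symm)]
      rcases hsp : rest.splitOn s with _ | ⟨q, qs⟩
      · exact absurd hsp (splitOn_ne_nil s rest)
      · simp

lemma splitOn_single (cs : List Char) : PySem.Chars.splitOn cs ['/'] = cs.splitOn '/' := by
  rw [PySem.Chars.splitOn, go_single '/' (cs.length+1) cs [] [] (by omega)]
  rcases hsp : cs.splitOn '/' with _|⟨q,qs⟩
  · exact absurd hsp (splitOn_ne_nil '/' cs)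
  · simp

lemma splitOn_append_sep (a b : List Char) (ha : '/' ∉ a) :
    (a ++ '/' :: b).splitOn '/' = a :: b.splitOn '/' := by
  induction a with
  | nil => simpa using splitOn_cons_self '/' b
  | cons d a ih =>
    have hd : d ≠ '/' := fun h => ha (h ▸ List.mem_cons_self)
    have ha' : '/' ∉ a := fun h => ha (List.mem_cons_of_mem d h)
    rw [List.cons_append, splitOn_cons_ne '/' d hd, ih ha']
    simp

lemma reconstruct (cs p0 p1 q : List Char) (qs : List (List Char))
    (h : cs.splitOn '/' = p0 :: p1 :: q :: qs) :
    cs = p0 ++ '/' :: (p1 ++ '/' :: ['/'].intercalate (q :: qs)) := by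
  conv_lhs => rw [← List.intercalate_splitOn cs '/', h]
  simp [List.intercalate, List.intersperse]

lemma sw_iff (x0 x1 cs : List Char) :
    PySem.Chars.startswith cs (x0 ++ '/' :: (x1 ++ ['/'])) = true ↔
      ∃ rest, cs = x0 ++ '/' :: (x1 ++ '/' :: rest) := by
  rw [PySem.Chars.startswith_iff]
  constructor
  · rintro ⟨rest, hr⟩
    exact ⟨rest, by rw [← hr]; simp⟩
  · rintro ⟨rest, hr⟩
    exact ⟨rest, by rw [hr]; simp⟩

lemma split_of_prefix (x0 x1 rest cs : List Char) (h0 : '/' ∉ x0) (h1 : '/' ∉ x1)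
    (hcs : cs = x0 ++ '/' :: (x1 ++ '/' :: rest)) :
    cs.splitOn '/' = x0 :: x1 :: rest.splitOn '/' := by
  subst hcs
  rw [splitOn_append_sep _ _ h0, splitOn_append_sep _ _ h1]

lemma sw_false_of_parts (cs x0 x1 p0 p1 : List Char) (tl : List (List Char))
    (hp : cs.splitOn '/' = p0 :: p1 :: tl)
    (h0 : '/' ∉ x0) (h1 : '/' ∉ x1) (hne : x0 ≠ p0 ∨ x1 ≠ p1) :
    PySem.Chars.startswith cs (x0 ++ '/' :: (x1 ++ ['/'])) = false := by
  by_contra hsw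
  have hsw' : PySem.Chars.startswith cs (x0 ++ '/' :: (x1 ++ ['/'])) = true := by
    cases h : PySem.Chars.startswith cs (x0 ++ '/' :: (x1 ++ ['/'])) with
    | false => exact absurd h hsw
    | true => rfl
  obtain ⟨rest, hr⟩ := (sw_iff x0 x1 cs).mp hsw'
  have h2 := split_of_prefix x0 x1 rest cs h0 h1 hr
  rw [hp] at h2
  rcases hne with hne | hne
  · exact hne (by injection h2 with e _; exact e.symm)
  · exact hne (by injection h2 with _ e; injection e with e' _; exact e'.symm)

lemma sw_true_of_parts (cs x0 x1 q : List Char) (qs : List (List Char))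
    (hp : cs.splitOn '/' = x0 :: x1 :: q :: qs) :
    PySem.Chars.startswith cs (x0 ++ '/' :: (x1 ++ ['/'])) = true := by
  rw [sw_iff]
  exact ⟨['/'].intercalate (q :: qs), reconstruct cs x0 x1 q qs hp⟩

lemma slice_of_parts (cs x0 x1 q : List Char) (qs : List (List Char))
    (hp : cs.splitOn '/' = x0 :: x1 :: q :: qs) :
    PySem.Chars.slice cs (some (PySem.List.len (x0 ++ '/' :: (x1 ++ ['/'])))) none
      = ['/'].intercalate (q :: qs) := by
  have hcs := reconstruct cs x0 x1 q qs hp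
  rw [PySem.Chars.slice, PySem.List.len_eq,
      PySem.List.slice_from cs (by positivity)]
  rw [hcs]
  have : x0 ++ '/' :: (x1 ++ '/' :: ['/'].intercalate (q :: qs))
       = (x0 ++ '/' :: (x1 ++ ['/'])) ++ ['/'].intercalate (q :: qs) := by simp
  rw [this]
  rw [Int.toNat_natCast, List.drop_left]


def sV : List Char := "videos".toList
def sS : List Char := "stats".toList
def kA : List Char := "observation.images.right_front".toList
def vA : List Char := "observation.images.main".toList
def kB : List Char := "observation.images.left_wrist".toList
def vB : List Char := "observation.images.camera0".toList
def kC : List Char := "observation.images.right_wrist".toList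
def vC : List Char := "observation.images.camera1".toList

def pre (site key : List Char) : List Char := site ++ '/' :: (key ++ ['/'])

lemma sw_parts (cs x0 x1 : List Char) (h0 : '/' ∉ x0) (h1 : '/' ∉ x1)
    (hsw : PySem.Chars.startswith cs (x0 ++ '/' :: (x1 ++ ['/'])) = true) :
    ∃ tl, tl ≠ [] ∧ cs.splitOn '/' = x0 :: x1 :: tl := by
  obtain ⟨rest, hr⟩ := (sw_iff x0 x1 cs).mp hsw
  exact ⟨rest.splitOn '/', splitOn_ne_nil _ _, split_of_prefix x0 x1 rest cs h0 h1 hr⟩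

lemma sw_false_of_short (cs x0 x1 : List Char) (h0 : '/' ∉ x0) (h1 : '/' ∉ x1)
    (hlen : (cs.splitOn '/').length < 3) :
    PySem.Chars.startswith cs (x0 ++ '/' :: (x1 ++ ['/'])) = false := by
  cases hb : PySem.Chars.startswith cs (x0 ++ '/' :: (x1 ++ ['/'])) with
  | false => rfl
  | true =>
    obtain ⟨tl, htl, hsp⟩ := sw_parts cs x0 x1 h0 h1 hb
    rw [hsp] at hlen
    have := List.length_pos_iff.mpr htl
    simp at hlen
    omega

lemma get?_isSome_cases (p1 : List Char) (h : (PySem.Dict.get? VIDEO_KEY_MAP p1).isSome = true) :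
    p1 = kA ∨ p1 = kB ∨ p1 = kC := by
  by_cases h1 : p1 = kA
  · exact Or.inl h1
  by_cases h2 : p1 = kB
  · exact Or.inr (Or.inl h2)
  by_cases h3 : p1 = kC
  · exact Or.inr (Or.inr h3)
  exfalso
  rw [PySem.Dict.get?] at h
  have hitems : VIDEO_KEY_MAP.items = [(kA,vA),(kB,vB),(kC,vC)] := rfl
  rw [hitems] at h
  rw [List.find?_cons_of_neg, List.find?_cons_of_neg, List.find?_cons_of_neg] at h
  · simp at h
  · simp only [beq_iff_eq]; exact fun e => h3 e.symm
  · simp only [beq_iff_eq]; exact fun e => h2 e.symm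
  · simp only [beq_iff_eq]; exact fun e => h1 e.symm

theorem remap_chars_eq (cs : List Char) : remapItemsLoop VIDEO_KEY_MAP.items cs = remapParts cs := by
  have hA : remapItemsLoop VIDEO_KEY_MAP.items cs =
      (if PySem.Chars.startswith cs (pre sV kA) then
        sV ++ '/' :: (vA ++ '/' :: PySem.Chars.slice cs (some (PySem.List.len (pre sV kA))) none)
      else if PySem.Chars.startswith cs (pre sS kA) then
        sS ++ '/' :: (vA ++ '/' :: PySem.Chars.slice cs (some (PySem.List.len (pre sS kA))) none)
      else if PySem.Chars.startswith cs (pre sV kB) then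
        sV ++ '/' :: (vB ++ '/' :: PySem.Chars.slice cs (some (PySem.List.len (pre sV kB))) none)
      else if PySem.Chars.startswith cs (pre sS kB) then
        sS ++ '/' :: (vB ++ '/' :: PySem.Chars.slice cs (some (PySem.List.len (pre sS kB))) none)
      else if PySem.Chars.startswith cs (pre sV kC) then
        sV ++ '/' :: (vC ++ '/' :: PySem.Chars.slice cs (some (PySem.List.len (pre sV kC))) none)
      else if PySem.Chars.startswith cs (pre sS kC) then
        sS ++ '/' :: (vC ++ '/' :: PySem.Chars.slice cs (some (PySem.List.len (pre sS kC))) none)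
      else cs) := rfl
  rcases hp0 : cs.splitOn '/' with _ | ⟨p0, tl0⟩
  · exact absurd hp0 (splitOn_ne_nil '/' cs)
  rcases tl0 with _ | ⟨p1, tl1⟩
  · -- one part: nothing matches
    have hBif : remapParts cs = cs := by
      simp only [remapParts]
      have hsp : PySem.Chars.splitOn cs "/".toList = cs.splitOn '/' := splitOn_single cs
      rw [hsp, hp0]
      simp
    rw [hA, hBif]
    simp only [pre]
    have hlen : (cs.splitOn '/').length < 3 := by rw [hp0]; simp
    rw [sw_false_of_short cs sV kA (by decide) (by decide) hlen,
        sw_false_of_short cs sS kA (by decide) (by decide) hlen,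
        sw_false_of_short cs sV kB (by decide) (by decide) hlen,
        sw_false_of_short cs sS kB (by decide) (by decide) hlen,
        sw_false_of_short cs sV kC (by decide) (by decide) hlen,
        sw_false_of_short cs sS kC (by decide) (by decide) hlen]
    simp
  rcases tl1 with _ | ⟨q, qs⟩
  · -- two parts: nothing matches
    have hBif : remapParts cs = cs := by
      simp only [remapParts]
      have hsp : PySem.Chars.splitOn cs "/".toList = cs.splitOn '/' := splitOn_single cs
      rw [hsp, hp0]
      simp
    rw [hA, hBif]
    simp only [pre]
    have hlen : (cs.splitOn '/').length < 3 := by rw [hp0]; simp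
    rw [sw_false_of_short cs sV kA (by decide) (by decide) hlen,
        sw_false_of_short cs sS kA (by decide) (by decide) hlen,
        sw_false_of_short cs sV kB (by decide) (by decide) hlen,
        sw_false_of_short cs sS kB (by decide) (by decide) hlen,
        sw_false_of_short cs sV kC (by decide) (by decide) hlen,
        sw_false_of_short cs sS kC (by decide) (by decide) hlen]
    simp
  · -- at least three parts
    have e0 : PySem.List.pyGetD (p0::p1::q::qs) 0 ([] : List Char) = p0 := by simp [pysem]
    have e1 : PySem.List.pyGetD (p0::p1::q::qs) 1 ([] : List Char) = p1 := by simp [pysem]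
    have e2 : PySem.List.slice (p0::p1::q::qs) (some 2) none = q::qs := by simp [pysem]
    have hBif : remapParts cs =
        (if 3 ≤ (p0::p1::q::qs).length ∧ (p0 = sV ∨ p0 = sS) ∧ (PySem.Dict.get? VIDEO_KEY_MAP p1).isSome = true then
          p0 ++ '/' :: ((PySem.Dict.get? VIDEO_KEY_MAP p1).getD [] ++ '/' :: ['/'].intercalate (q::qs))
        else cs) := by
      simp only [remapParts]
      have hsp : PySem.Chars.splitOn cs "/".toList = cs.splitOn '/' := splitOn_single cs
      rw [hsp, hp0, e0, e1, e2]
      rfl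
    by_cases hc : (p0 = sV ∨ p0 = sS) ∧ (p1 = kA ∨ p1 = kB ∨ p1 = kC)
    · obtain ⟨hv, hk⟩ := hc
      have hcondT : 3 ≤ (p0::p1::q::qs).length ∧ (p0 = sV ∨ p0 = sS) ∧ (PySem.Dict.get? VIDEO_KEY_MAP p1).isSome = true :=
        ⟨by simp, hv, by rcases hk with h|h|h <;> subst h <;> decide⟩
      rw [hA, hBif, if_pos hcondT]
      simp only [pre]
      have hne : ∀ x0 x1 : List Char, '/' ∉ x0 → '/' ∉ x1 → (x0 ≠ p0 ∨ x1 ≠ p1) →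
          PySem.Chars.startswith cs (x0 ++ '/' :: (x1 ++ ['/'])) = false := by
        intro x0 x1 h0 h1 hd
        exact sw_false_of_parts cs x0 x1 p0 p1 (q::qs) hp0 h0 h1 hd
      rcases hv with hv | hv <;> rcases hk with hk | hk | hk <;> subst hv <;> subst hk
      · rw [sw_true_of_parts cs sV kA q qs hp0, if_pos rfl,
            slice_of_parts cs sV kA q qs hp0]
        rfl
      · rw [hne sV kA (by decide) (by decide) (Or.inr (by decide)),
            hne sS kA (by decide) (by decide) (Or.inl (by decide)),
            sw_true_of_parts cs sV kB q qs hp0,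
            slice_of_parts cs sV kB q qs hp0]
        simp; rfl
      · rw [hne sV kA (by decide) (by decide) (Or.inr (by decide)),
            hne sS kA (by decide) (by decide) (Or.inl (by decide)),
            hne sV kB (by decide) (by decide) (Or.inr (by decide)),
            hne sS kB (by decide) (by decide) (Or.inl (by decide)),
            sw_true_of_parts cs sV kC q qs hp0,
            slice_of_parts cs sV kC q qs hp0]
        simp; rfl
      · rw [hne sV kA (by decide) (by decide) (Or.inl (by decide)),
            sw_true_of_parts cs sS kA q qs hp0,
            slice_of_parts cs sS kA q qs hp0]
        simp; rfl
      · rw [hne sV kA (by decide) (by decide) (Or.inl (by decide)),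
            hne sS kA (by decide) (by decide) (Or.inr (by decide)),
            hne sV kB (by decide) (by decide) (Or.inl (by decide)),
            sw_true_of_parts cs sS kB q qs hp0,
            slice_of_parts cs sS kB q qs hp0]
        simp; rfl
      · rw [hne sV kA (by decide) (by decide) (Or.inl (by decide)),
            hne sS kA (by decide) (by decide) (Or.inr (by decide)),
            hne sV kB (by decide) (by decide) (Or.inl (by decide)),
            hne sS kB (by decide) (by decide) (Or.inr (by decide)),
            hne sV kC (by decide) (by decide) (Or.inl (by decide)),
            sw_true_of_parts cs sS kC q qs hp0,
            slice_of_parts cs sS kC q qs hp0]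
        simp; rfl
    · have hcondF : ¬(3 ≤ (p0::p1::q::qs).length ∧ (p0 = sV ∨ p0 = sS) ∧ (PySem.Dict.get? VIDEO_KEY_MAP p1).isSome = true) := by
        intro h
        exact hc ⟨h.2.1, get?_isSome_cases p1 h.2.2⟩
      rw [hA, hBif, if_neg hcondF]
      simp only [pre]
      have hne : ∀ x0 x1 : List Char, (x0 = sV ∨ x0 = sS) → (x1 = kA ∨ x1 = kB ∨ x1 = kC) → x0 ≠ p0 ∨ x1 ≠ p1 := by
        intro x0 x1 hx0 hx1
        by_cases hx0e : x0 = p0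
        · by_cases hx1e : x1 = p1
          · exact absurd ⟨hx0e ▸ hx0, hx1e ▸ hx1⟩ hc
          · exact Or.inr hx1e
        · exact Or.inl hx0e
      rw [sw_false_of_parts cs sV kA p0 p1 (q::qs) hp0 (by decide) (by decide) (hne sV kA (Or.inl rfl) (Or.inl rfl)),
          sw_false_of_parts cs sS kA p0 p1 (q::qs) hp0 (by decide) (by decide) (hne sS kA (Or.inr rfl) (Or.inl rfl)),
          sw_false_of_parts cs sV kB p0 p1 (q::qs) hp0 (by decide) (by decide) (hne sV kB (Or.inl rfl) (Or.inr (Or.inl rfl))),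
          sw_false_of_parts cs sS kB p0 p1 (q::qs) hp0 (by decide) (by decide) (hne sS kB (Or.inr rfl) (Or.inr (Or.inl rfl))),
          sw_false_of_parts cs sV kC p0 p1 (q::qs) hp0 (by decide) (by decide) (hne sV kC (Or.inl rfl) (Or.inr (Or.inr rfl))),
          sw_false_of_parts cs sS kC p0 p1 (q::qs) hp0 (by decide) (by decide) (hne sS kC (Or.inr rfl) (Or.inr (Or.inr rfl)))]
      simp

-- ===== VERDICT (by name: the statement is the Claim_ definition above) =====
theorem remap_episode_column_spec : Claim_equal_remap_episode_column := by
  intro column _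
  unfold Spec_remap_episode_column remap_episode_column remap_episode_column_alt
  congr 1
  exact remap_chars_eq column.toList
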